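-- pv_equiv track=rewrite | github.com/manwar/perlweeklychallenge-club | challenge-318/pokgopun/python/ch-1.py | gp
-- ===== SOURCE A (Python) =====
-- def gp(string: str) -> list[str]:
--     lst: list[str] = []
--     char = ""
--     count = 0
--     for c in string:
--         if c == char:
--             count += 1
--         else:
--             if count >= 3:
--                 lst.append(char * count)
--             char = c
--             count = 1
--     else:
--         if count >= 3:
--             lst.append(char * count)
--     if len(lst) == 0:
--         return [""]
--     return lst
-- ===== SOURCE B (Python) =====
-- def gp(string: str) -> list[str]:
--     runs = []
--     i, n = 0, len(string)
--     while i < n: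
--         j = i + 1
--         while j < n and string[j] == string[i]:
--             j += 1
--         if j - i >= 3:
--             runs.append(string[i:j])
--         i = j
--     return runs or [""]
-- ===== Notes on version B (the rewrite author's own statement) =====
-- stated objective: alternative
-- what changed: Replaced the per-character state machine carrying a (char,count) accumulator with a two-pointer span scan that jumps run by run and slices each maximal run of length >= 3 directly out of the string.
import Mathlib
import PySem

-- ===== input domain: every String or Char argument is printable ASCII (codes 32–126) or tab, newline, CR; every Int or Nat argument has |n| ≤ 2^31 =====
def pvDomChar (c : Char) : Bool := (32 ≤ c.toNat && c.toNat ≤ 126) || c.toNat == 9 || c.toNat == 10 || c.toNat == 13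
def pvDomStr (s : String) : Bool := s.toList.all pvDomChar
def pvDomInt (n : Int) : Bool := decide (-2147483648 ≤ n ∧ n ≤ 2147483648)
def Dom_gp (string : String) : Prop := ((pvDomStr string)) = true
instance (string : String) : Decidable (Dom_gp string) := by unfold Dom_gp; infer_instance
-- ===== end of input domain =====

-- B replaces A's per-character (char,count) state machine by a run-by-run span scan
-- that slices each maximal run directly; objective: alternative (same cost).


-- ===== PORT A =====
-- run string "char * count": char is "" only while count = 0, so none ↦ "" is Python's "" * 0
def gpRun (ch : Option Char) (count : Nat) : String :=
  match ch with
  | some x => String.ofList (List.replicate count x)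
  | none => ""

def gpStep (st : List String × Option Char × Nat) (c : Char) : List String × Option Char × Nat :=
  match st with
  | (lst, ch, count) =>
    if some c = ch then (lst, ch, count + 1)
    else ((if count ≥ 3 then lst ++ [gpRun ch count] else lst), some c, 1)

def gp (string : String) : List String :=
  let st := string.toList.foldl gpStep ([], none, 0)
  let lst := if st.2.2 ≥ 3 then st.1 ++ [gpRun st.2.1 st.2.2] else st.1
  if lst.length = 0 then [""] else lst

-- ===== PORT B =====
-- Source B's inner while-loop advancing j over equal chars = takeWhile/dropWhile span;
-- string[i:j] is the run slice, rebuilt here as the head char plus the matched span.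
def gpAltRuns : List Char → List String
  | [] => []
  | c :: rest =>
    let run := rest.takeWhile (· == c)
    let rem := rest.dropWhile (· == c)
    if run.length + 1 ≥ 3 then String.ofList (c :: run) :: gpAltRuns rem
    else gpAltRuns rem
termination_by l => l.length
decreasing_by
  all_goals
    simpa using Nat.lt_succ_of_le (List.length_dropWhile_le (p := (· == c)) (l := rest))

def gp_alt (string : String) : List String :=
  let runs := gpAltRuns string.toList
  if runs = [] then [""] else runs

-- ===== PRECONDITION & SPEC =====
def Spec_gp (string : String) (out : List String) : Prop := out = gp_alt string
instance (string : String) (out : List String) : Decidable (Spec_gp string out) := by unfold Spec_gp; infer_instance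

-- ===== CLAIM (what is proved, stated in full; the proofs are below) =====
def Claim_equal_gp : Prop := ∀ (string : String), Dom_gp string → Spec_gp string (gp string)

-- ===== LEMMAS AND PROOFS =====

-- A's loop, rephrased recursively: runs emitted from state (current char c, count k)
def runsA : Char → Nat → List Char → List String
  | c, k, [] => if k ≥ 3 then [String.ofList (List.replicate k c)] else []
  | c, k, d :: r =>
    if d = c then runsA c (k + 1) r
    else (if k ≥ 3 then [String.ofList (List.replicate k c)] else []) ++ runsA d 1 r

def gpFinish (st : List String × Option Char × Nat) : List String :=
  if st.2.2 ≥ 3 then st.1 ++ [gpRun st.2.1 st.2.2] else st.1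

theorem gp_loop_eq (rest : List Char) : ∀ (c : Char) (k : Nat) (acc : List String),
    gpFinish (List.foldl gpStep (acc, some c, k) rest) = acc ++ runsA c k rest := by
  induction rest with
  | nil =>
    intro c k acc
    simp only [List.foldl_nil, gpFinish, runsA, gpRun]
    split_ifs <;> simp
  | cons d r ih =>
    intro c k acc
    simp only [List.foldl_cons, gpStep, runsA]
    by_cases h : d = c
    · simp [h, ih]
    · have h' : ¬ (some d = some c) := fun he => h (Option.some.inj he)
      rw [if_neg h', if_neg h]
      by_cases hk : k ≥ 3
      · rw [if_pos hk, if_pos hk, ih]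
        simp [gpRun]
      · rw [if_neg hk, if_neg hk, ih]
        simp

theorem takeWhile_rep (c : Char) (l : List Char) :
    l.takeWhile (· == c) = List.replicate (l.takeWhile (· == c)).length c := by
  induction l with
  | nil => simp
  | cons d r ih =>
    by_cases h : d = c
    · simpa [h, List.replicate_succ] using ih
    · simp [List.takeWhile_cons, h]

theorem runsA_eq (rest : List Char) : ∀ (c : Char) (k : Nat),
    runsA c k rest =
      (if k + (rest.takeWhile (· == c)).length ≥ 3 then
        [String.ofList (List.replicate (k + (rest.takeWhile (· == c)).length) c)] else [])
      ++ gpAltRuns (rest.dropWhile (· == c)) := by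
  induction rest with
  | nil => intro c k; simp [runsA, gpAltRuns]
  | cons d r ih =>
    intro c k
    by_cases h : d = c
    · subst h
      simp only [runsA, if_pos rfl, List.takeWhile_cons, List.dropWhile_cons,
        BEq.rfl, if_true, cond_true, List.length_cons]
      rw [ih d (k + 1)]
      have : k + 1 + (r.takeWhile (· == d)).length = k + ((r.takeWhile (· == d)).length + 1) := by omega
      rw [this]
    · have hb : (d == c) = false := by simpa using h
      simp only [runsA, if_neg h, List.takeWhile_cons, List.dropWhile_cons, hb,
        cond_false, List.length_nil, Nat.add_zero]
      rw [ih d 1]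
      show _ = (if k ≥ 3 then [String.ofList (List.replicate k c)] else []) ++ gpAltRuns (d :: r)
      have hrun : gpAltRuns (d :: r) =
          (if 1 + (r.takeWhile (· == d)).length ≥ 3 then
            [String.ofList (List.replicate (1 + (r.takeWhile (· == d)).length) d)] else [])
          ++ gpAltRuns (r.dropWhile (· == d)) := by
        rw [gpAltRuns]
        have : String.ofList (d :: r.takeWhile (· == d)) =
            String.ofList (List.replicate (1 + (r.takeWhile (· == d)).length) d) := by
          rw [Nat.add_comm 1, List.replicate_succ]
          conv_lhs => rw [takeWhile_rep d r]
        split_ifs with h1 h2 h2 <;> simp_all <;> omega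
      rw [hrun]

-- ===== VERDICT (by name: the statement is the Claim_ definition above) =====
theorem gp_spec : Claim_equal_gp := by
  intro s _
  show gp s = gp_alt s
  unfold gp gp_alt
  cases hs : s.toList with
  | nil => simp [gpAltRuns]
  | cons c rest =>
    simp only [List.foldl_cons]
    have hstep : gpStep ([], none, 0) c = ([], some c, 1) := by
      simp [gpStep]
    rw [hstep]
    have h1 := gp_loop_eq rest c 1 []
    have h2 := runsA_eq rest c 1
    have hruns : gpAltRuns (c :: rest) =
        (if 1 + (rest.takeWhile (· == c)).length ≥ 3 then
          [String.ofList (List.replicate (1 + (rest.takeWhile (· == c)).length) c)] else [])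
        ++ gpAltRuns (rest.dropWhile (· == c)) := by
      rw [gpAltRuns]
      have : String.ofList (c :: rest.takeWhile (· == c)) =
          String.ofList (List.replicate (1 + (rest.takeWhile (· == c)).length) c) := by
        rw [Nat.add_comm 1, List.replicate_succ]
        conv_lhs => rw [takeWhile_rep c rest]
      split_ifs with ha hb hb <;> simp_all <;> omega
    have hfin : gpFinish (List.foldl gpStep ([], some c, 1) rest) = gpAltRuns (c :: rest) := by
      rw [h1, h2, hruns]; simp
    have : (if (List.foldl gpStep ([], some c, 1) rest).2.2 ≥ 3 then
        (List.foldl gpStep ([], some c, 1) rest).1 ++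
          [gpRun (List.foldl gpStep ([], some c, 1) rest).2.1
            (List.foldl gpStep ([], some c, 1) rest).2.2]
      else (List.foldl gpStep ([], some c, 1) rest).1) = gpAltRuns (c :: rest) := hfin
    simp only [this]
    rcases gpAltRuns (c :: rest) with _ | _ <;> simp
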